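-- pv_equiv track=rewrite | github.com/vero-marchi/practica_2 | src/funciones.py | validate_user
-- ===== SOURCE A (Python) =====
-- def validate_user(username):
--     """
--     Valida un nombre de usuario con los siguientes criterios:
--     - Al menos 5 caracteres.
--     - Contiene al menos un número.
--     - Contiene al menos una letra mayúscula.
--     - Contine solo letras y números.
--
--     Args:
--     Nombre de usuario a validar (str).
--
--     Returns:
--     bool: True si se cumplen todos los criterios. False si no se cumple alguno de ellos
--
--     """
--
--     # Verificar si el usuario tiene menos de 5 caracteres y retorna falso
--     if len(username) < 5:
--         return False
--
--     # Inicializo variables booleanas para verificar las condiciones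
--     has_number = False
--     has_uppercase = False
--
--     # Recorro con un for cada caractér de username
--     for char in username:
--         # Verifico si el caracter es un número
--         if char.isdigit():
--             has_number = True
--         # Verifico si es una letra mayúscula
--         elif char.isupper():
--             has_uppercase = True
--         # Verifico si el caracter no es ni una letra ni un número
--         # char.isalpha() devuelve True si el carácter es una letra (A-Z, a-z)
--         # Si no es una letra ni un número devuelve false
--         elif not (char.isalpha() or char.isdigit()):
--             return False
--
--     # Retorno True o False verificando si se cumplen las condiciones
--     return has_number and has_uppercase
-- ===== SOURCE B (Python) =====
-- def validate_user(username):
--     return (len(username) >= 5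
--             and any(c.isdigit() for c in username)
--             and any(c.isupper() for c in username)
--             and all(c.isalpha() or c.isdigit() for c in username))
-- ===== Notes on version B (the rewrite author's own statement) =====
-- stated objective: idiomatic
-- what changed: Replaced the single stateful early-exit loop accumulating has_number/has_uppercase with a conjunction of four independent declarative checks (length guard plus any/any/all comprehensions).
import Mathlib
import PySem

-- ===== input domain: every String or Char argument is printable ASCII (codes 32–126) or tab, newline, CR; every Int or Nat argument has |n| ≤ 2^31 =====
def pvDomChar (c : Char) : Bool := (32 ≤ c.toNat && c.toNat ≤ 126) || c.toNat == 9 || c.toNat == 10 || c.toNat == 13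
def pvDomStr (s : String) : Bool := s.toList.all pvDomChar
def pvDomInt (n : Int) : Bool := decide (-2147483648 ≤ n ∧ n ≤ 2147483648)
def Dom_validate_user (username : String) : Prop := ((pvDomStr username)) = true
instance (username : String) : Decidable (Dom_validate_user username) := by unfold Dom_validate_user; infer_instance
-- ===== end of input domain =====

-- B replaces A's single stateful early-exit loop with a conjunction of four independent any/all checks (idiomatic decomposition, same cost).


-- ===== PORT A =====
-- the for-loop with early return, carrying (has_number, has_uppercase)
def validateLoopA : List Char → Bool → Bool → Bool
  | [], hasNum, hasUpp => hasNum && hasUpp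
  | c :: cs, hasNum, hasUpp =>
    if PySem.Chars.isdigit c then validateLoopA cs true hasUpp
    else if PySem.Chars.isupper c then validateLoopA cs hasNum true
    else if !(PySem.Chars.isalpha c || PySem.Chars.isdigit c) then false
    else validateLoopA cs hasNum hasUpp

def validate_user (username : String) : Bool :=
  if PySem.Str.len username < 5 then false
  else validateLoopA username.toList false false

-- ===== PORT B =====
def validate_user_alt (username : String) : Bool :=
  decide (5 ≤ PySem.Str.len username)
    && username.toList.any (fun c => PySem.Chars.isdigit c)
    && username.toList.any (fun c => PySem.Chars.isupper c)
    && username.toList.all (fun c => PySem.Chars.isalpha c || PySem.Chars.isdigit c)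

-- ===== PRECONDITION & SPEC =====
def Spec_validate_user (username : String) (out : Bool) : Prop := out = validate_user_alt username
instance (username : String) (out : Bool) : Decidable (Spec_validate_user username out) := by unfold Spec_validate_user; infer_instance

-- ===== CLAIM (what is proved, stated in full; the proofs are below) =====
def Claim_equal_validate_user : Prop := ∀ (username : String), Dom_validate_user username → Spec_validate_user username (validate_user username)

-- ===== LEMMAS AND PROOFS =====
theorem isupper_isalpha (c : Char) (h : PySem.Chars.isupper c = true) :
    PySem.Chars.isalpha c = true := by
  simp [PySem.Chars.isalpha, h]

theorem isdigit_not_isupper (c : Char) (h : PySem.Chars.isdigit c = true) :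
    PySem.Chars.isupper c = false := by
  simp only [PySem.Chars.isdigit, Bool.and_eq_true, decide_eq_true_eq] at h
  simp only [PySem.Chars.isupper, Bool.and_eq_false_iff, decide_eq_false_iff_not, not_le]
  left
  exact lt_of_le_of_lt h.2 (show '9' < 'A' by decide)

theorem validateLoopA_eq (cs : List Char) (hasNum hasUpp : Bool) :
    validateLoopA cs hasNum hasUpp =
      ((hasNum || cs.any (fun c => PySem.Chars.isdigit c))
        && (hasUpp || cs.any (fun c => PySem.Chars.isupper c))
        && cs.all (fun c => PySem.Chars.isalpha c || PySem.Chars.isdigit c)) := by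
  induction cs generalizing hasNum hasUpp with
  | nil => simp [validateLoopA]
  | cons c cs ih =>
    simp only [validateLoopA, List.any_cons, List.all_cons]
    by_cases hd : PySem.Chars.isdigit c = true
    · have hu := isdigit_not_isupper c hd
      simp [hd, hu, ih]
    · simp only [hd]
      by_cases hu : PySem.Chars.isupper c = true
      · have ha := isupper_isalpha c hu
        simp [hu, ha, ih]
      · simp only [Bool.not_eq_true] at hd hu
        by_cases ha : PySem.Chars.isalpha c = true
        · simp [hu, ha, ih]
        · simp only [Bool.not_eq_true] at ha
          simp [hu, ha]

-- ===== VERDICT (by name: the statement is the Claim_ definition above) =====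
theorem validate_user_spec : Claim_equal_validate_user := by
  intro username _
  unfold Spec_validate_user validate_user validate_user_alt
  by_cases h : PySem.Str.len username < 5
  · rw [if_pos h]
    have h5 : decide (5 ≤ PySem.Str.len username) = false := by
      simp only [decide_eq_false_iff_not]; omega
    rw [h5, Bool.false_and, Bool.false_and, Bool.false_and]
  · rw [if_neg h, validateLoopA_eq]
    have h5 : decide (5 ≤ PySem.Str.len username) = true := by
      simp only [decide_eq_true_eq]; omega
    rw [h5]
    simp only [Bool.false_or, Bool.true_and]
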